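-- pv_equiv track=rewrite | github.com/qikunxun/DynaCall | configs/gaia/tools.py | _split_top_level_csv
-- ===== SOURCE A (Python) =====
-- def _split_top_level_csv(text: str) -> list[str]:
--     parts = []
--     buf = []
--     depth = 0
--     for ch in text:
--         if ch in "[{":
--             depth += 1
--         elif ch in "]}":
--             depth = max(0, depth - 1)
--         if ch == "," and depth == 0:
--             parts.append("".join(buf).strip())
--             buf = []
--         else:
--             buf.append(ch)
--     if buf:
--         parts.append("".join(buf).strip())
--     return [part for part in parts if part]
-- ===== SOURCE B (Python) =====
-- def _split_top_level_csv(text: str) -> list[str]: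
--     # pass 1: record positions of top-level commas
--     idxs = []
--     depth = 0
--     for i, ch in enumerate(text):
--         if ch in "[{":
--             depth += 1
--         elif ch in "]}":
--             depth = max(0, depth - 1)
--         if ch == "," and depth == 0:
--             idxs.append(i)
--     # pass 2: slice between boundaries
--     parts = []
--     start = 0
--     for idx in idxs + [len(text)]:
--         parts.append(text[start:idx].strip())
--         start = idx + 1
--     return [p for p in parts if p]
-- ===== Notes on version B (the rewrite author's own statement) =====
-- stated objective: alternative
-- what changed: B separates boundary-finding from extraction: one pass records the indices of top-level commas, then a second pass slices the text between consecutive boundaries and strips each slice, instead of A's single pass accumulating characters into a buffer.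
import Mathlib
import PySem

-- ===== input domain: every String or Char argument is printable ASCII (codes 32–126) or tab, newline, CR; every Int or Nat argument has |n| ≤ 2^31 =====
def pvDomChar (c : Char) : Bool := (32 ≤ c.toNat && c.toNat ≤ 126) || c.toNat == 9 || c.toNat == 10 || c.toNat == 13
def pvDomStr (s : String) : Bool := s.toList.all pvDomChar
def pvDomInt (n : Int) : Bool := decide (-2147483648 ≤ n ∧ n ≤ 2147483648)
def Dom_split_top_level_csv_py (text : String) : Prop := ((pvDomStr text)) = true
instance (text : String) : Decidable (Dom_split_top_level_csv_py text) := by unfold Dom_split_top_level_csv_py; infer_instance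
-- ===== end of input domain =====

-- B finds all top-level comma positions first and then slices between them, instead of A's
-- single pass that accumulates characters into a buffer (objective: alternative decomposition).

-- ===== PORT A =====
-- the depth update both A and B perform on each character (identical code in both sources)
def pvDepth (c : Char) (depth : Int) : Int :=
  if c = '[' ∨ c = '{' then depth + 1
  else if c = ']' ∨ c = '}' then max 0 (depth - 1) else depth

-- the for-loop of A, state (parts, buf, depth); strip at append time as in A
def pvA_go (cs : List Char) (parts : List (List Char)) (buf : List Char) (depth : Int) :
    List (List Char) :=
  match cs with
  | [] => if buf ≠ [] then parts ++ [PySem.Chars.strip buf] else parts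
  | c :: rest =>
    let d : Int := pvDepth c depth
    if c = ',' ∧ d = 0 then pvA_go rest (parts ++ [PySem.Chars.strip buf]) [] d
    else pvA_go rest parts (buf ++ [c]) d

def split_top_level_csv_py (text : String) : List String :=
  ((pvA_go text.toList [] [] 0).filter (fun p => p ≠ [])).map String.mk

-- ===== PORT B =====
-- pass 1 of Source B: indices of top-level commas (i is the enumerate counter)
def pvB_idx (cs : List Char) (i : Nat) (depth : Int) : List Nat :=
  match cs with
  | [] => []
  | c :: rest =>
    let d : Int := pvDepth c depth
    if c = ',' ∧ d = 0 then i :: pvB_idx rest (i + 1) d else pvB_idx rest (i + 1) d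

-- pass 2 of Source B: slice text[start:idx] for each boundary, trailing boundary len(text);
-- in Source B always start ≤ idx ≤ len(text), so text[start:idx] is (drop start).take (idx - start)
def pvB_slices (full : List Char) (start : Nat) (idxs : List Nat) : List (List Char) :=
  match idxs with
  | [] => [PySem.Chars.strip (full.drop start)]
  | i :: rest =>
      PySem.Chars.strip ((full.drop start).take (i - start)) :: pvB_slices full (i + 1) rest

def split_top_level_csv_py_alt (text : String) : List String :=
  ((pvB_slices text.toList 0 (pvB_idx text.toList 0 0)).filter (fun p => p ≠ [])).map String.mk

-- ===== PRECONDITION & SPEC =====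
def Spec_split_top_level_csv_py (text : String) (out : List String) : Prop := out = split_top_level_csv_py_alt text
instance (text : String) (out : List String) : Decidable (Spec_split_top_level_csv_py text out) := by unfold Spec_split_top_level_csv_py; infer_instance

-- ===== CLAIM (what is proved, stated in full; the proofs are below) =====
def Claim_equal_split_top_level_csv_py : Prop := ∀ (text : String), Dom_split_top_level_csv_py text → Spec_split_top_level_csv_py text (split_top_level_csv_py text)

-- ===== LEMMAS AND PROOFS =====

-- common reference: the raw (unstripped) chunks between top-level commas, trailing chunk always kept
def pvCut (cs : List Char) (buf : List Char) (depth : Int) : List (List Char) :=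
  match cs with
  | [] => [buf]
  | c :: rest =>
    let d : Int := pvDepth c depth
    if c = ',' ∧ d = 0 then buf :: pvCut rest [] d else pvCut rest (buf ++ [c]) d

lemma pvA_cut (cs : List Char) : ∀ (parts : List (List Char)) (buf : List Char) (depth : Int),
    (pvA_go cs parts buf depth).filter (fun p => p ≠ []) =
      parts.filter (fun p => p ≠ []) ++
        ((pvCut cs buf depth).map PySem.Chars.strip).filter (fun p => p ≠ []) := by
  induction cs with
  | nil =>
    intro parts buf depth
    by_cases h : buf = [] <;>
      simp [pvA_go, pvCut, h, List.filter_append, PySem.Chars.strip, PySem.Chars.rstrip, PySem.Chars.lstrip]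
  | cons c rest ih =>
    intro parts buf depth
    simp only [pvA_go, pvCut]
    split
    · rw [ih]
      by_cases hb : PySem.Chars.strip buf = [] <;> simp [hb, List.filter_append]
    · rw [ih]

lemma pvB_cut (cs : List Char) : ∀ (pre buf : List Char) (depth : Int),
    pvB_slices (pre ++ buf ++ cs) pre.length
        (pvB_idx cs (pre.length + buf.length) depth) =
      (pvCut cs buf depth).map PySem.Chars.strip := by
  induction cs with
  | nil =>
    intro pre buf depth
    simp [pvB_slices, pvB_idx, pvCut, List.drop_left']
  | cons c rest ih =>
    intro pre buf depth
    simp only [pvB_idx, pvCut]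
    split
    · rename_i h
      simp only [pvB_slices, List.map_cons, h.2]
      have hd : (pre ++ buf ++ c :: rest).drop pre.length = buf ++ c :: rest := by
        rw [List.append_assoc, List.drop_left]
      rw [hd, Nat.add_sub_cancel_left, List.take_left]
      simp only [List.cons.injEq, true_and]
      have := ih (pre ++ buf ++ [c]) [] 0
      simpa [List.append_assoc, Nat.add_assoc] using this
    · have := ih pre (buf ++ [c]) (pvDepth c depth)
      simpa [Nat.add_assoc] using this

-- ===== VERDICT (by name: the statement is the Claim_ definition above) =====
theorem split_top_level_csv_py_spec : Claim_equal_split_top_level_csv_py := by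
  intro text _
  unfold Spec_split_top_level_csv_py split_top_level_csv_py split_top_level_csv_py_alt
  have hB := pvB_cut text.toList [] [] 0
  simp only [List.nil_append, List.length_nil, Nat.add_zero] at hB
  rw [hB, pvA_cut]
  simp
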